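-- pv_equiv track=rewrite | github.com/ViKtorMacias/IntrusionClassifier | Classifier.py | entrenar
-- ===== SOURCE A (Python) =====
-- def lista_palabras(texto):
--     palabras=[]
--     palabras_tmp=texto.lower().split()
--
--     for p in palabras_tmp:
--         if p not in palabras and len(p)>2:
--             palabras.append(p)
--
--             return palabras
--
-- def entrenar(textos):
--   c_palabras={}
--   c_categorias={}
--   c_textos=0
--   c_tot_palabras=0
--   #anadir al dicionario de categorias
--   for t in textos:
--     c_textos=c_textos+1
--     if t[1] not in c_categorias:
--       c_categorias[t[1]]=1
--     else:
--       c_categorias[t[1]]=c_categorias[t[1]]+1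
--
--
--   #anadir palabras al diccionario
--   for t in textos:
--     palabras=lista_palabras(t[0])
--     for p in palabras:
--       if p not in c_palabras:
--         c_tot_palabras=c_tot_palabras+1
--         c_palabras[p]={}
--         for c in c_categorias:
--
--           c_palabras[p][c]=0
--
--       c_palabras[p][t[1]]=c_palabras[p][t[1]]+1
--
--   return (c_palabras,c_categorias,c_textos,c_tot_palabras)
-- ===== SOURCE B (Python) =====
-- def entrenar(textos):
--     # Flatten the input into plain lists: all category labels, and one
--     # (word, category) pair per text (the first >2-char word of the lowered split).
--     cats = [c for _, c in textos]
--     pares = [(next(p for p in texto.lower().split() if len(p) > 2), cat)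
--              for texto, cat in textos]
--     # Tally the flat lists once (flat keys: categories, and (word, category) pairs).
--     n_cat = {}
--     for c in cats:
--         n_cat[c] = n_cat.get(c, 0) + 1
--     n_par = {}
--     for par in pares:
--         n_par[par] = n_par.get(par, 0) + 1
--     # Assemble the nested table in one shot from the flat tally, in
--     # first-occurrence key order (no incremental nested-dict updates at all).
--     cat_order = list(n_cat)
--     word_order = list(dict.fromkeys(p for p, _ in pares))
--     c_palabras = {p: {c: n_par.get((p, c), 0) for c in cat_order} for p in word_order}
--     return (c_palabras, n_cat, len(textos), len(word_order))
-- ===== Notes on version B (the rewrite author's own statement) =====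
-- stated objective: alternative
-- what changed: A builds the word-by-category table by incremental nested-dict mutation (create a zero row on first sight, then += per text) with hand-kept counters; B flattens the input into plain lists (all category labels, one (word,category) pair per text), tallies them once into flat Counter-style dicts, and assembles the nested table in one shot from the flat tally in dedup key order.
import Mathlib
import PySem

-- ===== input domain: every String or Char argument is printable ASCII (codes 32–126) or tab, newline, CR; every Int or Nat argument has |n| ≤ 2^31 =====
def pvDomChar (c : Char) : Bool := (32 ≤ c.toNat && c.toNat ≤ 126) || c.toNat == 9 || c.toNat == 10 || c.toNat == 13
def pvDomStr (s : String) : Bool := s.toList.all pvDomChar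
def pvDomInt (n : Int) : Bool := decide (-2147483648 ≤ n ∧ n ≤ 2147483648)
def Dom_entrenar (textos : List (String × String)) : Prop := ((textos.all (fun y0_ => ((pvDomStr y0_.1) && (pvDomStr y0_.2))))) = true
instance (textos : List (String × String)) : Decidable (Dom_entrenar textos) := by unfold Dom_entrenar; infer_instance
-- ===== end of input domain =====

-- B replaces A's incremental nested-dict mutation (zero row on first sight, then += per text, with
-- hand-kept counters) by flattening the input into plain lists and assembling each table in one shot:
-- dedup-ordered keys with values computed as occurrence counts over the flat lists; objective: alternative.
-- Return-value equivalence only (neither program mutates its argument).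

-- ===== PORT A =====
-- lista_palabras: the loop returns at the FIRST word longer than 2 chars, or falls through to Python's implicit None
def listaGo (tokens : List String) (palabras : List String) : Option (List String) :=
  match tokens with
  | [] => none
  | p :: rest =>
    if p ∉ palabras ∧ 2 < PySem.Str.len p then some (palabras ++ [p])
    else listaGo rest palabras

def lista_palabras (texto : String) : Option (List String) :=
  listaGo (PySem.Str.split₀ (PySem.Str.lower texto)) []

-- 'for c in c_categorias: c_palabras[p][c] = 0'
def pvZeroTable (cc : PySem.Dict String Int) : PySem.Dict String Int :=
  cc.keys.foldl (fun z c => z.insert c 0) (PySem.Dict.mk [])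

def pasoCategoria (st : PySem.Dict String Int × Int) (t : String × String) :
    PySem.Dict String Int × Int :=
  let c_textos := st.2 + 1
  let c_categorias :=
    if st.1.contains t.2 then st.1.insert t.2 (st.1.getD t.2 0 + 1)
    else st.1.insert t.2 1
  (c_categorias, c_textos)

def pasoPalabra (c_categorias : PySem.Dict String Int) (cat : String)
    (st2 : PySem.Dict String (PySem.Dict String Int) × Int) (p : String) :
    PySem.Dict String (PySem.Dict String Int) × Int :=
  let cp := if st2.1.contains p then st2.1 else st2.1.insert p (pvZeroTable c_categorias)
  let ctp : Int := if st2.1.contains p then st2.2 else st2.2 + 1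
  -- c_palabras[p][t[1]] += 1 (both keys are always present here; the getD defaults are never used inside Pre_)
  let inner := cp.getD p (PySem.Dict.mk [])
  (cp.insert p (inner.insert cat (inner.getD cat 0 + 1)), ctp)

def entrenar (textos : List (String × String)) : (List (String × List (String × Int))) × (List (String × Int)) × Int × Int :=
  let st1 := textos.foldl pasoCategoria (PySem.Dict.mk [], 0)
  let st2 := textos.foldl
    (fun st t =>
      -- lista_palabras = none is Python's TypeError on 'for p in None' (excluded by Pre_entrenar); .getD [] keeps the port total
      ((lista_palabras t.1).getD []).foldl (pasoPalabra st1.1 t.2) st)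
    (PySem.Dict.mk [], 0)
  (st2.1.items.map (fun kv => (kv.1, kv.2.items)), st1.1.items, st1.2, st2.2)

-- ===== PORT B =====
-- the inner 'for p in texto.lower().split(): if len(p) > 2: … break' scans to the first qualifying token
def pvPrimera (texto : String) : Option String :=
  (PySem.Str.split₀ (PySem.Str.lower texto)).find? (fun p => decide (2 < PySem.Str.len p))

def entrenar_alt (textos : List (String × String)) : (List (String × List (String × Int))) × (List (String × Int)) × Int × Int :=
  let cats := textos.map (fun t => t.2)
  -- pares: one (word, category) pair per text; pvPrimera = none is Python's StopIteration
  -- from next(...) (excluded by Pre_entrenar); .getD "" keeps the port total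
  let pares := textos.map (fun t => ((pvPrimera t.1).getD "", t.2))
  -- the two 'd[k] = d.get(k, 0) + 1' tally loops are collections-free Counters
  let nCat := PySem.Dict.counter cats
  let nPar := PySem.Dict.counter pares
  let catOrder := nCat.keys                                   -- list(n_cat)
  let wordOrder := PySem.List.dedup (pares.map (fun pc => pc.1))   -- list(dict.fromkeys(…))
  -- the dict comprehension: keys are the nodup dedup list, so the assoc list is a plain map
  let c_palabras := wordOrder.map
    (fun p => (p, catOrder.map (fun c => (c, nPar.getD (p, c) 0))))
  (c_palabras, nCat.items, (textos.length : Int), (wordOrder.length : Int))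

-- ===== PRECONDITION & SPEC =====
-- Pre_ excludes exactly the inputs where some text has no whitespace-split word longer than 2 characters:
-- there lista_palabras returns None and A raises TypeError ('for p in None').
def Pre_entrenar (textos : List (String × String)) : Prop :=
  ∀ t ∈ textos, ∃ p ∈ PySem.Str.split₀ (PySem.Str.lower t.1), 2 < PySem.Str.len p
instance (textos : List (String × String)) : Decidable (Pre_entrenar textos) := by unfold Pre_entrenar; infer_instance

def pvWitness_entrenar : (List (String × String)) := [("abc def", "pos"), ("BAD spam", "neg")]

def Spec_entrenar (textos : List (String × String)) (out : (List (String × List (String × Int))) × (List (String × Int)) × Int × Int) : Prop := out = entrenar_alt textos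
instance (textos : List (String × String)) (out : (List (String × List (String × Int))) × (List (String × Int)) × Int × Int) : Decidable (Spec_entrenar textos out) := by unfold Spec_entrenar; infer_instance

-- ===== CLAIM (what is proved, stated in full; the proofs are below) =====
def Claim_equal_entrenar : Prop := ∀ (textos : List (String × String)), Dom_entrenar textos → Pre_entrenar textos → Spec_entrenar textos (entrenar textos)

-- ===== LEMMAS AND PROOFS =====

-- proof-side names for A's loop bodies
def pvCatStep (cc : PySem.Dict String Int) (t : String × String) : PySem.Dict String Int :=
  cc.insert t.2 (cc.getD t.2 0 + 1)

def pvBump (d : PySem.Dict String (PySem.Dict String Int)) (p c : String) : PySem.Dict String (PySem.Dict String Int) :=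
  d.insert p (((d.getD p (PySem.Dict.mk [])).insert c ((d.getD p (PySem.Dict.mk [])).getD c 0 + 1)))

def pvBI (Z : PySem.Dict String Int) (ws : List (String × String)) (d : PySem.Dict String (PySem.Dict String Int)) : PySem.Dict String (PySem.Dict String Int) :=
  ws.foldl (fun d pc => if d.contains pc.1 then d else d.insert pc.1 Z) d

def pvINC (ws : List (String × String)) (d : PySem.Dict String (PySem.Dict String Int)) : PySem.Dict String (PySem.Dict String Int) :=
  ws.foldl (fun d pc => pvBump d pc.1 pc.2) d

def pvAW (Z : PySem.Dict String Int) (ws : List (String × String)) (st : PySem.Dict String (PySem.Dict String Int) × Int) : PySem.Dict String (PySem.Dict String Int) × Int :=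
  ws.foldl
    (fun st pc =>
      (pvBump (if st.1.contains pc.1 then st.1 else st.1.insert pc.1 Z) pc.1 pc.2,
       if st.1.contains pc.1 then st.2 else st.2 + 1))
    st

-- the fully assembled word-by-category table, B's shape
def pvTabla (W cats : List String) (cnt : String → String → Int) : PySem.Dict String (PySem.Dict String Int) :=
  PySem.Dict.mk (W.map (fun k => (k, PySem.Dict.mk (cats.map (fun c => (c, cnt k c))))))

lemma pvItems_insert_of_contains {ν : Type} (d : PySem.Dict String ν) (p : String) (v : ν)
    (hp : d.contains p = true) :
    (d.insert p v).items = d.items.map (fun r => if (r.1 == p) = true then (p, v) else r) := by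
  simp [PySem.Dict.insert, hp]

lemma pvItems_insert_of_not_contains {ν : Type} (d : PySem.Dict String ν) (p : String) (v : ν)
    (hp : d.contains p = false) : (d.insert p v).items = d.items ++ [(p, v)] := by
  simp [PySem.Dict.insert, hp]

lemma pvInsert_comm {ν : Type} (d : PySem.Dict String ν) (p q : String) (v w : ν)
    (hp : d.contains p = true) (hq : d.contains q = false) :
    (d.insert p v).insert q w = (d.insert q w).insert p v := by
  have hqp : (q == p) = false := by
    by_cases h : q = p
    · subst h; rw [hp] at hq; exact absurd hq (by simp)
    · simp [h]
  have h1 : (d.insert p v).contains q = false := by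
    rw [PySem.Dict.contains_insert, hqp, hq]; rfl
  have h2 : (d.insert q w).contains p = true := by
    rw [PySem.Dict.contains_insert, hp]; simp
  apply PySem.Dict.ext
  rw [pvItems_insert_of_not_contains _ _ _ h1, pvItems_insert_of_contains _ _ _ h2,
      pvItems_insert_of_contains _ _ _ hp, pvItems_insert_of_not_contains _ _ _ hq,
      List.map_append]
  simp
  intro h; exact absurd h (by simpa using hqp)

lemma pvSize_insert_of_contains {ν : Type} (d : PySem.Dict String ν) (p : String) (v : ν)
    (hp : d.contains p = true) : (d.insert p v).size = d.size := by
  simp [PySem.Dict.size, pvItems_insert_of_contains _ _ _ hp]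

lemma pvSize_insert_of_not_contains {ν : Type} (d : PySem.Dict String ν) (p : String) (v : ν)
    (hp : d.contains p = false) : (d.insert p v).size = d.size + 1 := by
  simp [PySem.Dict.size, pvItems_insert_of_not_contains _ _ _ hp]

lemma pvBI_cons (Z : PySem.Dict String Int) (pc : String × String) (ws : List (String × String))
    (d : PySem.Dict String (PySem.Dict String Int)) :
    pvBI Z (pc :: ws) d = pvBI Z ws (if d.contains pc.1 then d else d.insert pc.1 Z) := rfl

lemma pvBI_contains (Z : PySem.Dict String Int) (ws : List (String × String))
    (d : PySem.Dict String (PySem.Dict String Int)) (p : String) (hp : d.contains p = true) :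
    (pvBI Z ws d).contains p = true := by
  induction ws generalizing d with
  | nil => exact hp
  | cons pc ws ih =>
    rw [pvBI_cons]
    by_cases h : d.contains pc.1 = true
    · rw [if_pos h]; exact ih d hp
    · rw [if_neg h]
      exact ih _ (by rw [PySem.Dict.contains_insert, hp]; simp)

lemma pvBI_getD (Z : PySem.Dict String Int) (ws : List (String × String))
    (d : PySem.Dict String (PySem.Dict String Int)) (p : String) (d0 : PySem.Dict String Int)
    (hp : d.contains p = true) : (pvBI Z ws d).getD p d0 = d.getD p d0 := by
  induction ws generalizing d with
  | nil => rfl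
  | cons pc ws ih =>
    rw [pvBI_cons]
    by_cases h : d.contains pc.1 = true
    · rw [if_pos h]; exact ih d hp
    · rw [if_neg h]
      have hne : p ≠ pc.1 := by rintro rfl; rw [hp] at h; exact h rfl
      rw [ih _ (by rw [PySem.Dict.contains_insert, hp]; simp),
          PySem.Dict.getD_insert_of_ne _ _ _ hne]

lemma pvBI_insert (Z : PySem.Dict String Int) (ws : List (String × String))
    (d : PySem.Dict String (PySem.Dict String Int)) (p : String) (v : PySem.Dict String Int)
    (hp : d.contains p = true) : pvBI Z ws (d.insert p v) = (pvBI Z ws d).insert p v := by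
  induction ws generalizing d with
  | nil => rfl
  | cons pc ws ih =>
    rw [pvBI_cons, pvBI_cons]
    by_cases h : d.contains pc.1 = true
    · have h' : (d.insert p v).contains pc.1 = true := by
        rw [PySem.Dict.contains_insert, h]; simp
      rw [if_pos h, if_pos h']; exact ih d hp
    · have hne : (pc.1 == p) = false := by
        by_cases he : pc.1 = p
        · subst he; rw [hp] at h; exact absurd rfl h
        · simp [he]
      have h' : ¬ (d.insert p v).contains pc.1 = true := by
        rw [PySem.Dict.contains_insert, hne]; simpa using h
      rw [if_neg h, if_neg h']
      rw [pvInsert_comm d p pc.1 v Z hp (by simpa using h),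
          ih _ (by rw [PySem.Dict.contains_insert, hp]; simp)]

lemma pvAW_cons (Z : PySem.Dict String Int) (pc : String × String) (ws : List (String × String))
    (st : PySem.Dict String (PySem.Dict String Int) × Int) :
    pvAW Z (pc :: ws) st =
      pvAW Z ws
        (pvBump (if st.1.contains pc.1 then st.1 else st.1.insert pc.1 Z) pc.1 pc.2,
         if st.1.contains pc.1 then st.2 else st.2 + 1) := rfl

lemma pvINC_cons (pc : String × String) (ws : List (String × String))
    (d : PySem.Dict String (PySem.Dict String Int)) :
    pvINC (pc :: ws) d = pvINC ws (pvBump d pc.1 pc.2) := rfl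

lemma pvSize_bump (d : PySem.Dict String (PySem.Dict String Int)) (p c : String)
    (hp : d.contains p = true) : (pvBump d p c).size = d.size := by
  unfold pvBump; exact pvSize_insert_of_contains _ _ _ hp

lemma pvAW_eq (Z : PySem.Dict String Int) (ws : List (String × String))
    (d : PySem.Dict String (PySem.Dict String Int)) (n : Int) :
    pvAW Z ws (d, n) = (pvINC ws (pvBI Z ws d), n + ((pvBI Z ws d).size : Int) - (d.size : Int)) := by
  induction ws generalizing d n with
  | nil => simp [pvAW, pvBI, pvINC]
  | cons pc ws ih =>
    rw [pvAW_cons, pvBI_cons, pvINC_cons]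
    by_cases hp : d.contains pc.1 = true
    · rw [if_pos hp, if_pos hp]
      dsimp only
      rw [ih]
      have hv : (pvBI Z ws d).getD pc.1 (PySem.Dict.mk []) = d.getD pc.1 (PySem.Dict.mk []) :=
        pvBI_getD Z ws d pc.1 _ hp
      have hins : pvBI Z ws (pvBump d pc.1 pc.2) = pvBump (pvBI Z ws d) pc.1 pc.2 := by
        unfold pvBump; rw [hv, pvBI_insert Z ws d pc.1 _ hp]
      rw [hins]
      have hs1 : (pvBump d pc.1 pc.2).size = d.size := pvSize_bump d pc.1 _ hp
      have hs2 : (pvBump (pvBI Z ws d) pc.1 pc.2).size = (pvBI Z ws d).size :=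
        pvSize_bump _ _ _ (pvBI_contains Z ws d pc.1 hp)
      rw [hs1, hs2]
    · rw [if_neg hp, if_neg hp]
      dsimp only
      rw [ih]
      have hp0 : (d.insert pc.1 Z).contains pc.1 = true := by
        rw [PySem.Dict.contains_insert]; simp
      have hv : (pvBI Z ws (d.insert pc.1 Z)).getD pc.1 (PySem.Dict.mk [])
          = (d.insert pc.1 Z).getD pc.1 (PySem.Dict.mk []) :=
        pvBI_getD Z ws _ pc.1 _ hp0
      have hins : pvBI Z ws (pvBump (d.insert pc.1 Z) pc.1 pc.2)
          = pvBump (pvBI Z ws (d.insert pc.1 Z)) pc.1 pc.2 := by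
        unfold pvBump; rw [hv, pvBI_insert Z ws _ pc.1 _ hp0]
      rw [hins]
      have hs1 : (pvBump (d.insert pc.1 Z) pc.1 pc.2).size = d.size + 1 := by
        rw [pvSize_bump _ _ _ hp0, pvSize_insert_of_not_contains _ _ _ (by simpa using hp)]
      have hs2 : (pvBump (pvBI Z ws (d.insert pc.1 Z)) pc.1 pc.2).size
          = (pvBI Z ws (d.insert pc.1 Z)).size :=
        pvSize_bump _ _ _ (pvBI_contains Z ws _ pc.1 hp0)
      rw [hs1, hs2]
      congr 1
      push_cast
      ring

lemma pvListaGo_eq (tokens : List String) :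
    listaGo tokens [] = (tokens.find? (fun p => decide (2 < PySem.Str.len p))).map (fun w => [w]) := by
  induction tokens with
  | nil => rfl
  | cons p rest ih =>
    cases hd : decide (2 < PySem.Str.len p) with
    | true =>
      have hlen : 2 < p.length := by simpa using of_decide_eq_true hd
      rw [List.find?_cons_of_pos (p := fun p => decide (2 < PySem.Str.len p)) hd]
      simp [listaGo, hlen]
    | false =>
      have hlen : ¬ 2 < p.length := by simpa using of_decide_eq_false hd
      rw [List.find?_cons_of_neg (p := fun p => decide (2 < PySem.Str.len p)) (by simpa using hd)]
      simp [listaGo, hlen, ih]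

lemma pvPass1 (l : List (String × String)) (st : PySem.Dict String Int × Int) :
    l.foldl pasoCategoria st = (l.foldl pvCatStep st.1, st.2 + l.length) := by
  induction l generalizing st with
  | nil => simp
  | cons t l ih =>
    rw [List.foldl_cons, List.foldl_cons, ih]
    have hstep : pasoCategoria st t = (pvCatStep st.1 t, st.2 + 1) := by
      unfold pasoCategoria pvCatStep
      by_cases h : st.1.contains t.2 = true
      · simp [h]
      · dsimp only
        rw [if_neg h, PySem.Dict.getD_of_not_contains st.1 0 (by simpa using h)]
        norm_num
    rw [hstep]
    dsimp only
    rw [List.length_cons]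
    rw [Prod.ext_iff]
    refine ⟨rfl, ?_⟩
    push_cast
    ring

lemma pvCatFold (textos : List (String × String)) :
    textos.foldl pvCatStep (PySem.Dict.mk []) = PySem.Dict.counter (textos.map (fun t => t.2)) := by
  rw [PySem.Dict.counter_eq_foldl, List.foldl_map]
  rfl

lemma pvPass2 (cats : PySem.Dict String Int) (l : List (String × String))
    (h : ∀ t ∈ l, (pvPrimera t.1).isSome) (st : PySem.Dict String (PySem.Dict String Int) × Int) :
    l.foldl (fun st t => ((lista_palabras t.1).getD []).foldl (pasoPalabra cats t.2) st) st
      = pvAW (pvZeroTable cats) (l.map (fun t => ((pvPrimera t.1).getD "", t.2))) st := by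
  induction l generalizing st with
  | nil => rfl
  | cons t l ih =>
    have ht := h t (by simp)
    obtain ⟨w, hw⟩ := Option.isSome_iff_exists.mp ht
    have hl : lista_palabras t.1 = some [w] := by
      unfold lista_palabras
      rw [pvListaGo_eq]
      have hw' : (PySem.Str.split₀ (PySem.Str.lower t.1)).find? (fun p => decide (2 < PySem.Str.len p)) = some w := hw
      rw [hw']
      rfl
    rw [List.foldl_cons, List.map_cons, pvAW_cons]
    rw [ih (fun t' ht' => h t' (by simp [ht']))]
    refine congrArg _ ?_
    dsimp only
    rw [hl, hw]
    show pasoPalabra cats t.2 st w = _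
    rfl

lemma pvContains_mk_map {ν : Type} (l : List String) (f : String → ν) (q : String) :
    (PySem.Dict.mk (l.map (fun k => (k, f k)))).contains q = decide (q ∈ l) := by
  induction l with
  | nil => simp [PySem.Dict.contains]
  | cons a l ih =>
    simp only [PySem.Dict.contains, List.map_cons, List.any_cons] at *
    by_cases h : a = q
    · subst h; simp
    · simp [h, Ne.symm h, ih]

lemma pvGetD_mk_map {ν : Type} (l : List String) (f : String → ν) (q : String) (d0 : ν)
    (hq : q ∈ l) : (PySem.Dict.mk (l.map (fun k => (k, f k)))).getD q d0 = f q := by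
  induction l with
  | nil => cases hq
  | cons a l ih =>
    by_cases h : a = q
    · subst h; simp [PySem.Dict.getD, PySem.Dict.get?]
    · have hq' : q ∈ l := by
        rcases List.mem_cons.mp hq with h' | h'
        · exact absurd h'.symm h
        · exact h'
      simpa [PySem.Dict.getD, PySem.Dict.get?, h] using ih hq'

-- zero-table over a nodup key list, accumulator-generalized
lemma pvZeroItems (l : List String) (acc : List (String × Int)) (hl : l.Nodup)
    (h : ∀ c ∈ l, (PySem.Dict.mk acc).contains c = false) :
    (l.foldl (fun z c => z.insert c 0) (PySem.Dict.mk acc)).items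
      = acc ++ l.map (fun c => (c, (0 : Int))) := by
  induction l generalizing acc with
  | nil => simp
  | cons a l ih =>
    rw [List.foldl_cons]
    have ha : (PySem.Dict.mk acc).contains a = false := h a (by simp)
    have hins : (PySem.Dict.mk acc).insert a 0 = PySem.Dict.mk (acc ++ [(a, (0 : Int))]) := by
      apply PySem.Dict.ext
      rw [pvItems_insert_of_not_contains _ _ _ ha]
    have hfresh : ∀ c ∈ l, (PySem.Dict.mk (acc ++ [(a, (0 : Int))])).contains c = false := by
      intro c hc
      have hca : c ≠ a := by
        rintro rfl
        exact (List.nodup_cons.mp hl).1 hc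
      have hc' : (PySem.Dict.mk acc).contains c = false := h c (by simp [hc])
      simp only [PySem.Dict.contains, List.any_append, List.any_cons, List.any_nil] at *
      simp [hc']
      exact Ne.symm hca
    rw [hins, ih (acc ++ [(a, (0 : Int))]) (List.Nodup.of_cons hl) hfresh]
    simp

lemma pvBI_items (Z : PySem.Dict String Int) (ws : List (String × String)) (acc : List String) :
    (pvBI Z ws (PySem.Dict.mk (acc.map (fun p => (p, Z))))).items
      = (List.foldl PySem.Set.add acc (ws.map Prod.fst)).map (fun p => (p, Z)) := by
  induction ws generalizing acc with
  | nil => rfl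
  | cons pc ws ih =>
    rw [pvBI_cons, List.map_cons, List.foldl_cons]
    rw [pvContains_mk_map]
    by_cases h : pc.1 ∈ acc
    · have hs : PySem.Set.add acc pc.1 = acc := by
        simp [PySem.Set.add, PySem.Set.contains, h]
      rw [if_pos (by simp [h]), hs]
      exact ih acc
    · have hs : PySem.Set.add acc pc.1 = acc ++ [pc.1] := by
        simp [PySem.Set.add, PySem.Set.contains, h]
      rw [if_neg (by simp [h]), hs]
      have hins : (PySem.Dict.mk (acc.map (fun p => (p, Z)))).insert pc.1 Z
          = PySem.Dict.mk ((acc ++ [pc.1]).map (fun p => (p, Z))) := by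
        apply PySem.Dict.ext
        rw [pvItems_insert_of_not_contains _ _ _ (by rw [pvContains_mk_map]; simpa using h)]
        simp
      rw [hins]
      exact ih (acc ++ [pc.1])

lemma pvBump_tabla (W cats : List String) (cnt : String → String → Int) (p c0 : String)
    (hp : p ∈ W) (hc : c0 ∈ cats) :
    pvBump (pvTabla W cats cnt) p c0
      = pvTabla W cats (fun k c => cnt k c + if k = p ∧ c = c0 then 1 else 0) := by
  unfold pvBump pvTabla
  rw [pvGetD_mk_map _ _ _ _ hp]
  have hrow : (PySem.Dict.mk (cats.map (fun c => (c, cnt p c)))).insert c0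
        ((PySem.Dict.mk (cats.map (fun c => (c, cnt p c)))).getD c0 0 + 1)
      = PySem.Dict.mk (cats.map (fun c => (c, cnt p c + if c = c0 then 1 else 0))) := by
    rw [pvGetD_mk_map _ _ _ _ hc]
    apply PySem.Dict.ext
    rw [pvItems_insert_of_contains _ _ _ (by rw [pvContains_mk_map]; simpa using hc)]
    rw [List.map_map]
    apply List.map_congr_left
    intro c _
    by_cases h : c = c0
    · subst h; simp
    · simp [h]
  rw [hrow]
  apply PySem.Dict.ext
  rw [pvItems_insert_of_contains _ _ _ (by rw [pvContains_mk_map]; simpa using hp)]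
  rw [List.map_map]
  apply List.map_congr_left
  intro k _
  by_cases h : k = p
  · subst h; simp
  · simp only [Function.comp]
    have : (k == p) = false := by simp [h]
    simp [this, h]

lemma pvINC_tabla (W cats : List String) (ws : List (String × String))
    (cnt : String → String → Int)
    (hws : ∀ pc ∈ ws, pc.1 ∈ W ∧ pc.2 ∈ cats) :
    pvINC ws (pvTabla W cats cnt)
      = pvTabla W cats (fun k c => cnt k c + (List.count (k, c) ws : Int)) := by
  induction ws generalizing cnt with
  | nil =>
    unfold pvINC pvTabla
    simp
  | cons pc ws ih =>
    obtain ⟨hp, hc⟩ := hws pc (by simp)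
    rw [pvINC_cons, pvBump_tabla W cats cnt pc.1 pc.2 hp hc]
    rw [ih _ (fun pc' h' => hws pc' (by simp [h']))]
    unfold pvTabla
    apply PySem.Dict.ext
    dsimp only
    apply List.map_congr_left
    intro k _
    refine congrArg (Prod.mk k) ?_
    refine congrArg PySem.Dict.mk ?_
    apply List.map_congr_left
    intro c _
    refine congrArg (Prod.mk c) ?_
    dsimp only
    rw [List.count_cons]
    have : (pc == (k, c)) = decide (k = pc.1 ∧ c = pc.2) := by
      obtain ⟨a, b⟩ := pc
      rw [show ((a, b) == (k, c)) = (a == k && b == c) from rfl]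
      rw [Bool.beq_eq_decide_eq a k, Bool.beq_eq_decide_eq b c]
      by_cases h1 : a = k
      · subst h1
        by_cases h2 : b = c
        · subst h2; simp
        · simp [h2, Ne.symm h2]
      · simp [h1, Ne.symm h1]
    rw [this]
    by_cases h : k = pc.1 ∧ c = pc.2
    · simp [h]; ring
    · simp [h]

-- ===== VERDICT (by name: the statement is the Claim_ definition above) =====
theorem entrenar_spec : Claim_equal_entrenar := by
  intro textos _ hpre
  unfold Spec_entrenar entrenar entrenar_alt
  have hsome : ∀ t ∈ textos, (pvPrimera t.1).isSome := by
    intro t ht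
    obtain ⟨p, hp, hlen⟩ := hpre t ht
    exact List.find?_isSome.mpr ⟨p, hp, by simpa using hlen⟩
  dsimp only
  rw [pvPass1, pvPass2 _ _ hsome]
  dsimp only
  rw [pvCatFold]
  -- abbreviations
  set cats := textos.map (fun t => t.2) with hcats
  set ws := textos.map (fun t => ((pvPrimera t.1).getD "", t.2)) with hws
  set catOrder := (PySem.Dict.counter cats).keys with hcatOrder
  set W := PySem.List.dedup (ws.map (fun pc => pc.1)) with hW
  have hcatOrder' : catOrder = PySem.Set.ofList cats := by
    rw [hcatOrder, PySem.Dict.keys_counter]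
  -- the zero table is B's catOrder rows
  have hZ : pvZeroTable (PySem.Dict.counter cats) = PySem.Dict.mk (catOrder.map (fun c => (c, (0 : Int)))) := by
    apply PySem.Dict.ext
    unfold pvZeroTable
    have := pvZeroItems catOrder [] (by rw [hcatOrder']; exact PySem.Set.nodup_ofList cats)
      (by intro c _; simp [PySem.Dict.contains])
    rw [← hcatOrder]
    simpa using this
  rw [hZ, pvAW_eq]
  -- the seed table: all rows zero
  have hBI : pvBI (PySem.Dict.mk (catOrder.map (fun c => (c, (0 : Int))))) ws (PySem.Dict.mk [])
      = pvTabla W catOrder (fun _ _ => 0) := by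
    apply PySem.Dict.ext
    have h0 := pvBI_items (PySem.Dict.mk (catOrder.map (fun c => (c, (0 : Int))))) ws []
    simp only [List.map_nil] at h0
    rw [h0]
    unfold pvTabla
    rw [hW, PySem.List.dedup_eq_ofList, PySem.Set.ofList_eq_foldl]
  rw [hBI]
  have hmem : ∀ pc ∈ ws, pc.1 ∈ W ∧ pc.2 ∈ catOrder := by
    intro pc hpc
    constructor
    · rw [hW, PySem.List.mem_dedup]
      exact List.mem_map_of_mem hpc
    · rw [hcatOrder', PySem.Set.mem_ofList]
      rw [hws] at hpc
      obtain ⟨t, ht, rfl⟩ := List.mem_map.mp hpc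
      exact List.mem_map.mpr ⟨t, ht, rfl⟩
  rw [pvINC_tabla W catOrder ws _ hmem]
  -- assemble the four components
  refine Prod.ext ?_ (Prod.ext ?_ (Prod.ext ?_ ?_))
  · -- c_palabras
    unfold pvTabla
    dsimp only
    rw [List.map_map]
    apply List.map_congr_left
    intro k _
    simp [PySem.Dict.getD_counter]
  · -- c_categorias
    rfl
  · -- c_textos
    simp
  · -- c_tot_palabras
    unfold pvTabla
    simp [PySem.Dict.size]
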